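-- pv_equiv track=rewrite | github.com/so1icitx/Revenix | brain/app/sequential_detector.py | _count_sequential_ports
-- ===== SOURCE A (Python) =====
-- from typing import List, Dict, Optional, Tuple
--
-- def _count_sequential_ports(ports: List[int]) -> int:
--     """Count how many ports are in sequence (e.g., 80, 81, 82)."""
--     if len(ports) < 3:
--         return 0
--
--     sorted_ports = sorted(set(ports))
--     sequential = 0
--
--     for i in range(len(sorted_ports) - 1):
--         if sorted_ports[i+1] - sorted_ports[i] == 1:
--             sequential += 1
--
--     return sequential
-- ===== SOURCE B (Python) =====
-- from typing import List
--
-- def _count_sequential_ports(ports: List[int]) -> int: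
--     """Count how many ports are in sequence (e.g., 80, 81, 82)."""
--     if len(ports) < 3:
--         return 0
--     s = set(ports)
--     return sum(1 for p in s if p + 1 in s)
-- ===== Notes on version B (the rewrite author's own statement) =====
-- stated objective: simpler
-- what changed: Replaces sorting the deduplicated ports and scanning adjacent index pairs with a single set-membership count of elements p whose successor p+1 is also in the set (O(n) expected vs O(n log n), though a timing run read only ~1.2-1.5x).
import Mathlib
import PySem

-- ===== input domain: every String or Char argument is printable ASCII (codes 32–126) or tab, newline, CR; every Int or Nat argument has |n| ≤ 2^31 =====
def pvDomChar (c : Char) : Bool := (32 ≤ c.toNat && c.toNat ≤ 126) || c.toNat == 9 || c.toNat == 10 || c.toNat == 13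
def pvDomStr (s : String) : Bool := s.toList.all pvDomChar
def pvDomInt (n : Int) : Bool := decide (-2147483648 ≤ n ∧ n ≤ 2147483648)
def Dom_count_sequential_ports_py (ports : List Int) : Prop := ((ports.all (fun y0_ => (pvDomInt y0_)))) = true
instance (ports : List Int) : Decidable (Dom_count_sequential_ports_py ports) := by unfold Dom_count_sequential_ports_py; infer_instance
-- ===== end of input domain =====

-- B replaces sorting the deduplicated ports and scanning adjacent index pairs with a
-- single set-membership count of elements whose successor is also in the set (simpler).


-- ===== PORT A =====
-- for-loop over range(len(sorted_ports) - 1); indexing is always in range there,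
-- so pyGetD with default 0 is exact.
def count_sequential_ports_py (ports : List Int) : Int :=
  if ports.length < 3 then 0
  else
    let sorted_ports := PySem.List.sorted (PySem.Set.ofList ports) (fun x => x) false
    let sequential : Int :=
      (PySem.List.pyRange 0 ((sorted_ports.length : Int) - 1)).foldl
        (fun seq i =>
          if PySem.List.pyGetD sorted_ports (i + 1) 0 - PySem.List.pyGetD sorted_ports i 0 = 1
          then seq + 1 else seq) 0
    sequential

-- ===== PORT B =====
-- sum(1 for p in s if p + 1 in s): an order-independent count over the set.
def count_sequential_ports_py_alt (ports : List Int) : Int :=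
  if ports.length < 3 then 0
  else
    let s : PySem.Set Int := PySem.Set.ofList ports
    ((s.countP (fun p => PySem.Set.contains s (p + 1)) : Nat) : Int)

-- ===== PRECONDITION & SPEC =====
def Spec_count_sequential_ports_py (ports : List Int) (out : Int) : Prop := out = count_sequential_ports_py_alt ports
instance (ports : List Int) (out : Int) : Decidable (Spec_count_sequential_ports_py ports out) := by unfold Spec_count_sequential_ports_py; infer_instance

-- ===== CLAIM (what is proved, stated in full; the proofs are below) =====
def Claim_equal_count_sequential_ports_py : Prop := ∀ (ports : List Int), Dom_count_sequential_ports_py ports → Spec_count_sequential_ports_py ports (count_sequential_ports_py ports)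

-- ===== LEMMAS AND PROOFS =====

-- number of adjacent pairs at distance 1 (proof-side characterisation of A's loop)
def pvAdj : List Int → Nat
  | a :: b :: t => (if b - a = 1 then 1 else 0) + pvAdj (b :: t)
  | _ => 0

-- A's index scan counts exactly the adjacent pairs
theorem pvAdj_of_range (L : List Int) :
    (List.range (L.length - 1)).countP
      (fun i => decide (L.getD (i + 1) 0 - L.getD i 0 = 1)) = pvAdj L := by
  induction L with
  | nil => rfl
  | cons a t ih =>
    cases t with
    | nil => rfl
    | cons b r =>
      simp only [List.length_cons, Nat.add_sub_cancel] at *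
      rw [List.range_succ_eq_map, List.countP_cons, List.countP_map]
      simp only [List.getD_cons_succ, List.getD_cons_zero, Function.comp_def, Nat.succ_eq_add_one]
      simp only [List.getD_cons_succ] at ih
      rw [ih]
      simp [pvAdj]
      split_ifs <;> omega

-- on a strictly increasing list, counting p with p+1 a member counts the adjacent pairs
theorem pvAdj_of_mem (L : List Int) (h : L.Pairwise (· < ·)) :
    L.countP (fun p => decide ((p + 1) ∈ L)) = pvAdj L := by
  induction L with
  | nil => rfl
  | cons a t ih =>
    have hpa := (List.pairwise_cons.mp h).1
    have hpt := (List.pairwise_cons.mp h).2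
    rw [List.countP_cons]
    have htail : t.countP (fun p => decide ((p + 1) ∈ a :: t)) =
        t.countP (fun p => decide ((p + 1) ∈ t)) := by
      refine List.countP_congr (fun x hx => ?_)
      have hax := hpa x hx
      simp only [List.mem_cons, decide_eq_true_eq]
      constructor
      · rintro (h1 | h1)
        · omega
        · exact h1
      · exact fun h1 => Or.inr h1
    rw [htail, ih hpt]
    cases t with
    | nil => simp [pvAdj]
    | cons b r =>
      have hab : a < b := hpa b (List.mem_cons_self ..)
      have hbr : ∀ x ∈ r, b < x := fun x hx => (List.pairwise_cons.mp hpt).1 x hx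
      by_cases hb : b = a + 1
      · simp [pvAdj, hb, List.mem_cons]
        omega
      · have hnm : (a + 1) ∉ b :: r := by
          intro hm
          rcases List.mem_cons.mp hm with h1 | h1
          · exact hb h1.symm
          · have := hbr _ h1; omega
        have : b - a ≠ 1 := by omega
        simp [pvAdj, hnm, this]

-- ===== VERDICT (by name: the statement is the Claim_ definition above) =====
theorem count_sequential_ports_py_spec : Claim_equal_count_sequential_ports_py := by
  intro ports _
  unfold Spec_count_sequential_ports_py count_sequential_ports_py count_sequential_ports_py_alt
  by_cases hlen : ports.length < 3
  · simp [hlen]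
  · simp only [hlen, if_false]
    set s : PySem.Set Int := PySem.Set.ofList ports with hs
    set L := PySem.List.sorted s (fun x => x) false with hL
    have hne : L ≠ [] := by
      rw [hL, Ne, PySem.List.sorted_eq_nil_iff, hs]
      intro h
      have : ports = [] := by
        cases ports with
        | nil => rfl
        | cons x xs =>
          exfalso
          have : x ∈ PySem.Set.ofList (x :: xs) := by
            simp [PySem.Set.mem_ofList]
          simp [h] at this
      simp [this] at hlen
    have hlen1 : 0 < L.length := List.length_pos_of_ne_nil hne
    have hcast : ((L.length : Int) - 1) = ((L.length - 1 : Nat) : Int) := by omega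
    rw [hcast, PySem.List.pyRange_zero_natCast]
    have hfun : (fun (seq : Int) (i : Int) =>
        if PySem.List.pyGetD L (i + 1) 0 - PySem.List.pyGetD L i 0 = 1 then seq + 1 else seq)
        = (fun (seq : Int) (i : Int) =>
        if (fun i : Int => decide (PySem.List.pyGetD L (i + 1) 0 - PySem.List.pyGetD L i 0 = 1)) i = true
        then seq + 1 else seq) := by
      funext seq i; simp
    rw [hfun, PySem.List.foldl_count_if, List.countP_map]
    have hA : (List.range (L.length - 1)).countP
        ((fun i : Int => decide (PySem.List.pyGetD L (i + 1) 0 - PySem.List.pyGetD L i 0 = 1)) ∘ (fun k : Nat => (k : Int)))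
        = pvAdj L := by
      rw [← pvAdj_of_range L]
      refine List.countP_congr (fun k _ => ?_)
      simp only [Function.comp_apply]
      have h1 : ((k : Int) + 1) = ((k + 1 : Nat) : Int) := by omega
      rw [h1, PySem.List.pyGetD_natCast, PySem.List.pyGetD_natCast]
    have hB : s.countP (fun p => PySem.Set.contains s (p + 1)) = pvAdj L := by
      have hperm : L.Perm s := PySem.List.sorted_perm s (fun x => x) false
      rw [← hperm.countP_eq]
      rw [← pvAdj_of_mem L (by rw [hL, hs]; exact PySem.List.sorted_ofList_pairwise_lt ports)]
      refine List.countP_congr (fun x _ => ?_)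
      simp [PySem.Set.contains, hL, PySem.List.mem_sorted]
    rw [hA, hB]
    simp
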